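-- pv_equiv track=rewrite | github.com/mstephjuan/ASPECTandSENTIMENT | ABSA.py | listSentences
-- ===== SOURCE A (Python) =====
-- def listSentences(sentence_maps, grouped_aspects):
--     text_list = {}
--     for aspect_label, aspects in grouped_aspects.items():
--         text_list[aspect_label] = {'Positive': [], 'Negative': []}
--         for aspect, sentiment_list in sentence_maps.items():
--             if aspect == aspect_label:
--                 for sentiment in sentiment_list:
--                     sentence = sentiment[0][0]
--                     sentiment_label = sentiment[0][1]
--                     if sentiment_label == 'Positive' and sentence not in text_list[aspect_label]['Positive']:
--                         text_list[aspect_label]['Positive'].append(sentence)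
--                     elif sentiment_label == 'Negative' and sentence not in text_list[aspect_label]['Negative']:
--                         text_list[aspect_label]['Negative'].append(sentence)
--     return text_list
-- ===== SOURCE B (Python) =====
-- def listSentences(sentence_maps, grouped_aspects):
--     labels = set(grouped_aspects)
--     index = {}
--     for aspect, sentiment_list in sentence_maps.items():
--         if aspect not in labels:
--             continue
--         pos, neg = [], []
--         seen_pos, seen_neg = set(), set()
--         for sentiment in sentiment_list:
--             sentence, sentiment_label = sentiment[0]
--             if sentiment_label == 'Positive':
--                 if sentence not in seen_pos:
--                     seen_pos.add(sentence)
--                     pos.append(sentence)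
--             elif sentiment_label == 'Negative':
--                 if sentence not in seen_neg:
--                     seen_neg.add(sentence)
--                     neg.append(sentence)
--         index[aspect] = {'Positive': pos, 'Negative': neg}
--     return {label: index.get(label, {'Positive': [], 'Negative': []})
--             for label in grouped_aspects}
-- ===== Notes on version B (the rewrite author's own statement) =====
-- stated objective: faster
-- what changed: A rescans all of sentence_maps for every label and dedupes with O(n) list membership; B flips the nesting into one index-building pass over sentence_maps (skipping aspects absent from grouped_aspects, deduping with seen-sets while appending to ordered lists) followed by a selection pass over grouped_aspects keys with a constant-time index lookup.
import Mathlib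
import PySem

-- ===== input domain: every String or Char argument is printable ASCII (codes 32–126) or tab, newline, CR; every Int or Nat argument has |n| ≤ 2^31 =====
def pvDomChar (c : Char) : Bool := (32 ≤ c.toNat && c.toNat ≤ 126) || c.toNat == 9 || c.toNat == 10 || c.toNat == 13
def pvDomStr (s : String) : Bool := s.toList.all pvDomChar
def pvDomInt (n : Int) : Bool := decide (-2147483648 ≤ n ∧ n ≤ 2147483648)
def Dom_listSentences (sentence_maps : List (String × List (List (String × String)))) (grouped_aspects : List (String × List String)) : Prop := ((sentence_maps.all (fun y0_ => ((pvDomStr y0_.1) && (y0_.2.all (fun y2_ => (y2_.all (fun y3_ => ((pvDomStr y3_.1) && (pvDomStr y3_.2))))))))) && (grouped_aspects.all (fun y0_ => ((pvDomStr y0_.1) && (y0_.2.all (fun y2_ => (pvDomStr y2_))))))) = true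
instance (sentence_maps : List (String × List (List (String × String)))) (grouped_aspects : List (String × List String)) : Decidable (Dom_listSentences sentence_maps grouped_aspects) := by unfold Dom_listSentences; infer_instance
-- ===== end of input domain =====

-- B replaces A's per-label rescan of sentence_maps (with list-membership dedup) by one
-- index-building pass over sentence_maps (seen-sets for dedup, ordered lists for output) and a
-- second selection pass over grouped_aspects keys; return values proved equal on Pre_.

-- ===== PORT A =====
-- innermost 'for sentiment in sentiment_list' body of A (reads sentiment[0]; Pre_ keeps it in range)
def pvAStep (aspect_label : String) (tl : PySem.Dict String (PySem.Dict String (List String)))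
    (sentiment : List (String × String)) : PySem.Dict String (PySem.Dict String (List String)) :=
  let sentence := (PySem.List.pyGetD sentiment 0 ("", "")).1
  let sentiment_label := (PySem.List.pyGetD sentiment 0 ("", "")).2
  if sentiment_label = "Positive" ∧ sentence ∉ (tl.getD aspect_label PySem.Dict.empty).getD "Positive" [] then
    tl.modify aspect_label PySem.Dict.empty (fun d => d.modify "Positive" [] (fun l => l ++ [sentence]))
  else if sentiment_label = "Negative" ∧ sentence ∉ (tl.getD aspect_label PySem.Dict.empty).getD "Negative" [] then
    tl.modify aspect_label PySem.Dict.empty (fun d => d.modify "Negative" [] (fun l => l ++ [sentence]))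
  else tl

-- middle loop of A: 'for aspect, sentiment_list in sentence_maps.items(): if aspect == aspect_label: …'
def pvAScan (sentence_maps : List (String × List (List (String × String)))) (aspect_label : String)
    (tl : PySem.Dict String (PySem.Dict String (List String))) : PySem.Dict String (PySem.Dict String (List String)) :=
  sentence_maps.foldl (fun tl q => if q.1 = aspect_label then q.2.foldl (pvAStep aspect_label) tl else tl) tl

-- outer loop body of A: 'text_list[aspect_label] = {...}' then the middle loop
def pvAOuter (sentence_maps : List (String × List (List (String × String))))
    (tl : PySem.Dict String (PySem.Dict String (List String))) (g : String × List String) :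
    PySem.Dict String (PySem.Dict String (List String)) :=
  pvAScan sentence_maps g.1
    (tl.insert g.1 (PySem.Dict.ofList [("Positive", ([] : List String)), ("Negative", ([] : List String))]))

def listSentences (sentence_maps : List (String × List (List (String × String)))) (grouped_aspects : List (String × List String)) : List (String × List (String × List String)) :=
  (grouped_aspects.foldl (pvAOuter sentence_maps) PySem.Dict.empty).items.map (fun kv => (kv.1, kv.2.items))

-- ===== PORT B =====
-- B's inner loop body, state (pos, neg, seen_pos, seen_neg)
def pvBStep (st : List String × List String × PySem.Set String × PySem.Set String)
    (sentiment : List (String × String)) : List String × List String × PySem.Set String × PySem.Set String :=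
  let q := PySem.List.pyGetD sentiment 0 ("", "")
  if q.2 = "Positive" then
    if q.1 ∈ st.2.2.1 then st else (st.1 ++ [q.1], st.2.1, (st.2.2.1).add q.1, st.2.2.2)
  else if q.2 = "Negative" then
    if q.1 ∈ st.2.2.2 then st else (st.1, st.2.1 ++ [q.1], st.2.2.1, (st.2.2.2).add q.1)
  else st

-- B's index-building pass ('continue' on aspects outside labels)
def pvBIndex (labels : PySem.Set String) (sentence_maps : List (String × List (List (String × String))))
    (idx : PySem.Dict String (PySem.Dict String (List String))) : PySem.Dict String (PySem.Dict String (List String)) :=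
  sentence_maps.foldl (fun idx p =>
    if p.1 ∈ labels then
      let st := p.2.foldl pvBStep ([], [], PySem.Set.empty, PySem.Set.empty)
      idx.insert p.1 (PySem.Dict.ofList [("Positive", st.1), ("Negative", st.2.1)])
    else idx) idx

-- B's selection pass body: result[label] = index.get(label, {'Positive': [], 'Negative': []})
def pvBSelect (index : PySem.Dict String (PySem.Dict String (List String)))
    (r : PySem.Dict String (PySem.Dict String (List String))) (g : String × List String) :
    PySem.Dict String (PySem.Dict String (List String)) :=
  r.insert g.1 (index.getD g.1 (PySem.Dict.ofList [("Positive", ([] : List String)), ("Negative", ([] : List String))]))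

def listSentences_alt (sentence_maps : List (String × List (List (String × String)))) (grouped_aspects : List (String × List String)) : List (String × List (String × List String)) :=
  (grouped_aspects.foldl
      (pvBSelect (pvBIndex (PySem.Set.ofList (grouped_aspects.map (fun g => g.1))) sentence_maps PySem.Dict.empty))
      PySem.Dict.empty).items.map (fun kv => (kv.1, kv.2.items))

-- ===== PRECONDITION & SPEC =====
-- A raises IndexError on sentiment[0] when an aspect matching some grouped label carries an empty
-- sentiment entry: those inputs are excluded; association lists with duplicate keys in
-- sentence_maps cannot arise from Python dict arguments and are excluded too.
def Pre_listSentences (sentence_maps : List (String × List (List (String × String)))) (grouped_aspects : List (String × List String)) : Prop :=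
  (sentence_maps.map Prod.fst).Nodup ∧
  ∀ p ∈ sentence_maps, (∃ g ∈ grouped_aspects, g.1 = p.1) → ∀ s ∈ p.2, s ≠ []
instance (sentence_maps : List (String × List (List (String × String)))) (grouped_aspects : List (String × List String)) : Decidable (Pre_listSentences sentence_maps grouped_aspects) := by unfold Pre_listSentences; infer_instance

def pvWitness_listSentences : (List (String × List (List (String × String)))) × (List (String × List String)) :=
  ([("food", [[("good food", "Positive")], [("bad food", "Negative")]])], [("food", ["good food"])])

def Spec_listSentences (sentence_maps : List (String × List (List (String × String)))) (grouped_aspects : List (String × List String)) (out : List (String × List (String × List String))) : Prop := out = listSentences_alt sentence_maps grouped_aspects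
instance (sentence_maps : List (String × List (List (String × String)))) (grouped_aspects : List (String × List String)) (out : List (String × List (String × List String))) : Decidable (Spec_listSentences sentence_maps grouped_aspects out) := by unfold Spec_listSentences; infer_instance

-- ===== CLAIM (what is proved, stated in full; the proofs are below) =====
def Claim_equal_listSentences : Prop := ∀ (sentence_maps : List (String × List (List (String × String)))) (grouped_aspects : List (String × List String)), Dom_listSentences sentence_maps grouped_aspects → Pre_listSentences sentence_maps grouped_aspects → Spec_listSentences sentence_maps grouped_aspects (listSentences sentence_maps grouped_aspects)

-- ===== LEMMAS AND PROOFS =====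

-- the two-field inner dict {'Positive': pn.1, 'Negative': pn.2}
def pvPairD (pn : List String × List String) : PySem.Dict String (List String) :=
  PySem.Dict.ofList [("Positive", pn.1), ("Negative", pn.2)]

-- common pair-level description of one dedup step
def pvCStep (pn : List String × List String) (s : List (String × String)) : List String × List String :=
  let q := PySem.List.pyGetD s 0 ("", "")
  if q.2 = "Positive" ∧ q.1 ∉ pn.1 then (pn.1 ++ [q.1], pn.2)
  else if q.2 = "Negative" ∧ q.1 ∉ pn.2 then (pn.1, pn.2 ++ [q.1])
  else pn

-- the (pos, neg) lists A ends up with at label ℓ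
def pvAvalPN (ℓ : String) (sentence_maps : List (String × List (List (String × String)))) : List String × List String :=
  sentence_maps.foldl (fun pn q => if q.1 = ℓ then q.2.foldl pvCStep pn else pn) ([], [])

theorem pvAStep_insert (ℓ : String) (tl : PySem.Dict String (PySem.Dict String (List String)))
    (pn : List String × List String) (s : List (String × String)) :
    pvAStep ℓ (tl.insert ℓ (pvPairD pn)) s = tl.insert ℓ (pvPairD (pvCStep pn s)) := by
  unfold pvAStep pvCStep
  simp only [PySem.Dict.getD_insert_self]
  have hgp : (pvPairD pn).getD "Positive" [] = pn.1 := rfl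
  have hgn : (pvPairD pn).getD "Negative" [] = pn.2 := rfl
  rw [hgp, hgn]
  split_ifs with h1 h2
  · simp only [PySem.Dict.modify, PySem.Dict.getD_insert_self, PySem.Dict.insert_insert_self]; rfl
  · simp only [PySem.Dict.modify, PySem.Dict.getD_insert_self, PySem.Dict.insert_insert_self]; rfl
  · rfl

theorem pvA_inner (ℓ : String) (ss : List (List (String × String)))
    (tl : PySem.Dict String (PySem.Dict String (List String))) (pn : List String × List String) :
    ss.foldl (pvAStep ℓ) (tl.insert ℓ (pvPairD pn)) = tl.insert ℓ (pvPairD (ss.foldl pvCStep pn)) := by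
  induction ss generalizing pn with
  | nil => rfl
  | cons s ss ih => simp only [List.foldl_cons, pvAStep_insert]; exact ih _

theorem pvA_scan (ℓ : String) (sm : List (String × List (List (String × String))))
    (tl : PySem.Dict String (PySem.Dict String (List String))) (pn : List String × List String) :
    pvAScan sm ℓ (tl.insert ℓ (pvPairD pn))
      = tl.insert ℓ (pvPairD (sm.foldl (fun pn q => if q.1 = ℓ then q.2.foldl pvCStep pn else pn) pn)) := by
  induction sm generalizing pn with
  | nil => rfl
  | cons p sm ih =>
    show pvAScan sm ℓ (if p.1 = ℓ then p.2.foldl (pvAStep ℓ) (tl.insert ℓ (pvPairD pn)) else tl.insert ℓ (pvPairD pn))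
      = tl.insert ℓ (pvPairD (sm.foldl (fun pn q => if q.1 = ℓ then q.2.foldl pvCStep pn else pn)
          (if p.1 = ℓ then p.2.foldl pvCStep pn else pn)))
    by_cases hp : p.1 = ℓ
    · rw [if_pos hp, if_pos hp, pvA_inner]; exact ih _
    · rw [if_neg hp, if_neg hp]; exact ih _

theorem pvBStep_diag (pn : List String × List String) (s : List (String × String)) :
    pvBStep (pn.1, pn.2, pn.1, pn.2) s
      = ((pvCStep pn s).1, (pvCStep pn s).2, (pvCStep pn s).1, (pvCStep pn s).2) := by
  unfold pvBStep pvCStep PySem.Set.add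
  by_cases hP : (PySem.List.pyGetD s 0 ("", "")).2 = "Positive"
  · by_cases hm : (PySem.List.pyGetD s 0 ("", "")).1 ∈ pn.1
    · simp [hP, hm]
    · simp [hP, hm]
  · by_cases hN : (PySem.List.pyGetD s 0 ("", "")).2 = "Negative"
    · by_cases hm : (PySem.List.pyGetD s 0 ("", "")).1 ∈ pn.2
      · simp [hN, hm]
      · simp [hN, hm]
    · simp [hP, hN]

theorem pvB_inner (ss : List (List (String × String))) (pn : List String × List String) :
    ss.foldl pvBStep (pn.1, pn.2, pn.1, pn.2)
      = ((ss.foldl pvCStep pn).1, (ss.foldl pvCStep pn).2,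
         (ss.foldl pvCStep pn).1, (ss.foldl pvCStep pn).2) := by
  induction ss generalizing pn with
  | nil => rfl
  | cons s ss ih => simp only [List.foldl_cons, pvBStep_diag]; exact ih _

theorem pvBIndex_get?_of_not_mem (labels : PySem.Set String) (sm : List (String × List (List (String × String))))
    (idx : PySem.Dict String (PySem.Dict String (List String))) (ℓ : String)
    (h : ∀ p ∈ sm, p.1 ≠ ℓ) : (pvBIndex labels sm idx).get? ℓ = idx.get? ℓ := by
  induction sm generalizing idx with
  | nil => rfl
  | cons p sm ih =>
    have hp : p.1 ≠ ℓ := h p (List.mem_cons_self ..)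
    show (pvBIndex labels sm _).get? ℓ = idx.get? ℓ
    rw [ih _ (fun q hq => h q (List.mem_cons_of_mem _ hq))]
    by_cases hl : p.1 ∈ labels
    · simp only [if_pos hl]
      exact PySem.Dict.get?_insert_of_ne idx _ (Ne.symm hp)
    · simp only [if_neg hl]

theorem pvAval_of_not_mem (ℓ : String) (sm : List (String × List (List (String × String))))
    (pn : List String × List String) (h : ∀ p ∈ sm, p.1 ≠ ℓ) :
    sm.foldl (fun pn q => if q.1 = ℓ then q.2.foldl pvCStep pn else pn) pn = pn := by
  induction sm generalizing pn with
  | nil => rfl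
  | cons p sm ih =>
    simp only [List.foldl_cons, if_neg (h p (List.mem_cons_self ..))]
    exact ih _ (fun q hq => h q (List.mem_cons_of_mem _ hq))

theorem pvBIndex_getD (labels : PySem.Set String) (ℓ : String) (hℓ : ℓ ∈ labels) :
    ∀ (sm : List (String × List (List (String × String)))), (sm.map Prod.fst).Nodup →
    ∀ (idx : PySem.Dict String (PySem.Dict String (List String))), idx.get? ℓ = none →
    (pvBIndex labels sm idx).getD ℓ (pvPairD ([], [])) = pvPairD (pvAvalPN ℓ sm) := by
  intro sm
  induction sm with
  | nil =>
    intro _ idx h0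
    show idx.getD ℓ _ = _
    rw [PySem.Dict.getD, h0]; rfl
  | cons p sm ih =>
    intro hnd idx h0
    simp only [List.map_cons, List.nodup_cons] at hnd
    by_cases hp : p.1 = ℓ
    · have hrest : ∀ q ∈ sm, q.1 ≠ ℓ := by
        intro q hq
        rw [← hp]
        exact fun e => hnd.1 (e ▸ List.mem_map_of_mem hq)
      have hval : pvAvalPN ℓ (p :: sm) = p.2.foldl pvCStep ([], []) := by
        unfold pvAvalPN
        rw [List.foldl_cons, if_pos hp]
        exact pvAval_of_not_mem ℓ sm _ hrest
      show (pvBIndex labels sm (if p.1 ∈ labels then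
          idx.insert p.1 (PySem.Dict.ofList [("Positive", (p.2.foldl pvBStep ([], [], PySem.Set.empty, PySem.Set.empty)).1), ("Negative", (p.2.foldl pvBStep ([], [], PySem.Set.empty, PySem.Set.empty)).2.1)])
        else idx)).getD ℓ (pvPairD ([], [])) = pvPairD (pvAvalPN ℓ (p :: sm))
      rw [PySem.Dict.getD, pvBIndex_get?_of_not_mem _ _ _ _ hrest, hp, if_pos hℓ,
          PySem.Dict.get?_insert_self, Option.getD_some, hval]
      rw [show (([], [], PySem.Set.empty, PySem.Set.empty) : List String × List String × PySem.Set String × PySem.Set String)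
            = ((([], []) : List String × List String).1, (([], []) : List String × List String).2,
               (([], []) : List String × List String).1, (([], []) : List String × List String).2) from rfl,
          pvB_inner]
      rfl
    · show (pvBIndex labels sm _).getD ℓ _ = _
      have h0' : (if p.1 ∈ labels then
            idx.insert p.1 (PySem.Dict.ofList [("Positive", (p.2.foldl pvBStep ([], [], PySem.Set.empty, PySem.Set.empty)).1), ("Negative", (p.2.foldl pvBStep ([], [], PySem.Set.empty, PySem.Set.empty)).2.1)])
          else idx).get? ℓ = none := by
        split_ifs
        · rw [PySem.Dict.get?_insert_of_ne _ _ (fun e => hp (e.symm))]; exact h0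
        · exact h0
      unfold pvAvalPN
      simp only [List.foldl_cons, if_neg hp]
      exact ih hnd.2 _ h0'

-- ===== VERDICT (by name: the statement is the Claim_ definition above) =====
theorem listSentences_spec : Claim_equal_listSentences := by
  intro sm ga _ hpre
  show listSentences sm ga = listSentences_alt sm ga
  unfold listSentences listSentences_alt
  refine congrArg (List.map _) (congrArg PySem.Dict.items ?_)
  apply PySem.List.foldl_congr_mem
  intro tl g hg
  have ha : pvAOuter sm tl g = tl.insert g.1 (pvPairD (pvAvalPN g.1 sm)) := by
    unfold pvAOuter
    rw [show (PySem.Dict.ofList [("Positive", ([] : List String)), ("Negative", ([] : List String))])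
          = pvPairD ([], []) from rfl, pvA_scan]
    rfl
  rw [ha]
  unfold pvBSelect
  congr 1
  rw [show (PySem.Dict.ofList [("Positive", ([] : List String)), ("Negative", ([] : List String))])
        = pvPairD ([], []) from rfl]
  rw [pvBIndex_getD _ _ ((PySem.Set.mem_ofList _ _).2 (List.mem_map_of_mem hg)) sm hpre.1 _ rfl]
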